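-- pv_equiv track=rewrite | github.com/kimbersykes87-source/ZappaVault | update_library_durations.py | find_duration
-- ===== SOURCE A (Python) =====
-- def normalize_path(path: str) -> str:
--     """Normalize a file path for matching"""
--     # Normalize slashes
--     normalized = path.replace('\\', '/')
--     # Ensure starts with /
--     if not normalized.startswith('/'):
--         normalized = '/' + normalized
--     return normalized
--
-- def find_duration(file_path: str, durations: dict) -> int:
--     """Find duration for a file path, trying multiple matching strategies"""
--     normalized = normalize_path(file_path)
--
--     # Try exact match
--     if normalized in durations:
--         return durations[normalized]
--
--     # Try lowercase match
--     if normalized.lower() in durations: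
--         return durations[normalized.lower()]
--
--     # Try matching by filename
--     file_name = normalized.split('/')[-1] if '/' in normalized else normalized
--     if file_name:
--         for db_path, duration in durations.items():
--             db_file_name = db_path.split('/')[-1] if '/' in db_path else db_path
--             if db_file_name.lower() == file_name.lower():
--                 return duration
--
--     return 0
-- ===== SOURCE B (Python) =====
-- def find_duration(file_path: str, durations: dict) -> int:
--     """Find duration for a file path in ONE pass over the dict: each entry is
--     ranked (0 exact key, 1 lowercase key, 2 basename match) and the pass keeps
--     the first entry of the best rank seen, with an early exit on an exact hit."""
--     normalized = file_path.replace('\\', '/')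
--     if not normalized.startswith('/'):
--         normalized = '/' + normalized
--     low = normalized.lower()
--     name = (normalized.split('/')[-1] if '/' in normalized else normalized).lower()
--     best, bestv = 3, 0
--     for p, v in durations.items():
--         if p == normalized:
--             return v
--         r = 1 if p == low else (
--             2 if name and (p.split('/')[-1] if '/' in p else p).lower() == name
--             else 3)
--         if r < best:
--             best, bestv = r, v
--     return bestv
-- ===== Notes on version B (the rewrite author's own statement) =====
-- stated objective: alternative
-- what changed: A's three staged probes (exact lookup, lowercase lookup, then a fallback basename scan that recomputes file_name.lower() on every entry) are replaced by ONE pass over the items with a best-rank accumulator: each entry is ranked 0/1/2 (exact, lowercase key, basename match), the first entry of the lowest rank is kept, the probe name is lowercased once up front, and the pass exits early only on an exact hit.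
import Mathlib
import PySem

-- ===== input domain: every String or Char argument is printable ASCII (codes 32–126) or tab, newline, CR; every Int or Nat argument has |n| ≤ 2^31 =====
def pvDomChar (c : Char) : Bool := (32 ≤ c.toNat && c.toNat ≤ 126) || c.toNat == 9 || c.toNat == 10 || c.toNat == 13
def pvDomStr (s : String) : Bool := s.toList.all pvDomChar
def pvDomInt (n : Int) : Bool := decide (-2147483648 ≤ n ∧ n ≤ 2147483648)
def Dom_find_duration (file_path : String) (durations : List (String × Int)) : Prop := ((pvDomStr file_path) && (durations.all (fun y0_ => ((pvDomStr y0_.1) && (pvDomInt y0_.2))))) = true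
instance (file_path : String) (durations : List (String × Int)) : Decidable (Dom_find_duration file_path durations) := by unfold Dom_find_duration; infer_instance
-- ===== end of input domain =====

-- B replaces A's three staged probes (exact lookup, lowercase lookup, basename scan)
-- by ONE pass over the items with a best-rank accumulator (objective: alternative).

-- ===== PORT A =====
-- dict membership + lookup on the association list (first match)
def dget? (d : List (String × Int)) (k : List Char) : Option Int :=
  match d with
  | [] => none
  | (s, v) :: t => if s.toList = k then some v else dget? t k

-- normalize_path: replace backslashes, ensure a leading '/'
def normalize_path (path : List Char) : List Char :=
  let normalized := PySem.Chars.replace path ['\\'] ['/']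
  if PySem.Chars.startswith normalized ['/'] then normalized else '/' :: normalized

-- the 'for db_path, duration in durations.items():' loop with its early return
def scanA (d : List (String × Int)) (file_name : List Char) : Int :=
  match d with
  | [] => 0
  | (db, dur) :: t =>
    let db_file_name :=
      if PySem.Chars.isIn ['/'] db.toList
      then PySem.List.pyGetD (PySem.Chars.splitOn db.toList ['/']) (-1) []
      else db.toList
    if PySem.Chars.lower db_file_name = PySem.Chars.lower file_name then dur
    else scanA t file_name

def find_duration (file_path : String) (durations : List (String × Int)) : Int :=
  let normalized := normalize_path file_path.toList
  match dget? durations normalized with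
  | some v => v
  | none =>
    match dget? durations (PySem.Chars.lower normalized) with
    | some v => v
    | none =>
      let file_name :=
        if PySem.Chars.isIn ['/'] normalized
        then PySem.List.pyGetD (PySem.Chars.splitOn normalized ['/']) (-1) []
        else normalized
      if file_name = [] then 0 else scanA durations file_name

-- ===== PORT B =====
-- (p.split('/')[-1] if '/' in p else p).lower()
def bBase (cs : List Char) : List Char :=
  PySem.Chars.lower
    (if PySem.Chars.isIn ['/'] cs
     then PySem.List.pyGetD (PySem.Chars.splitOn cs ['/']) (-1) []
     else cs)

-- the single pass: rank each entry (exact returns at once), keep the first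
-- entry of the best (lowest) rank seen so far in (best, bv)
def scanB (d : List (String × Int)) (n low nm : List Char) (best : Nat) (bv : Int) : Int :=
  match d with
  | [] => bv
  | (p, v) :: t =>
    if p.toList = n then v
    else
      let r : Nat :=
        if p.toList = low then 1
        else if nm ≠ [] ∧ bBase p.toList = nm then 2
        else 3
      if r < best then scanB t n low nm r v else scanB t n low nm best bv

def find_duration_alt (file_path : String) (durations : List (String × Int)) : Int :=
  let n0 := PySem.Chars.replace file_path.toList ['\\'] ['/']
  let normalized := if PySem.Chars.startswith n0 ['/'] then n0 else '/' :: n0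
  let low := PySem.Chars.lower normalized
  let name := bBase normalized
  scanB durations normalized low name 3 0

-- ===== PRECONDITION & SPEC =====
def Spec_find_duration (file_path : String) (durations : List (String × Int)) (out : Int) : Prop := out = find_duration_alt file_path durations
instance (file_path : String) (durations : List (String × Int)) (out : Int) : Decidable (Spec_find_duration file_path durations out) := by unfold Spec_find_duration; infer_instance

-- ===== CLAIM (what is proved, stated in full; the proofs are below) =====
def Claim_equal_find_duration : Prop := ∀ (file_path : String) (durations : List (String × Int)), Dom_find_duration file_path durations → Spec_find_duration file_path durations (find_duration file_path durations)

-- ===== LEMMAS AND PROOFS =====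

-- first entry whose lowered basename equals nm (nm already lowered; none if nm = [])
def firstBase (d : List (String × Int)) (nm : List Char) : Option Int :=
  match d with
  | [] => none
  | (p, v) :: t => if nm ≠ [] ∧ bBase p.toList = nm then some v else firstBase t nm

theorem lower_eq_nil_iff (cs : List Char) : PySem.Chars.lower cs = [] ↔ cs = [] := by
  simp [PySem.Chars.lower]

-- characterisation of the single pass in terms of the three staged probes
theorem scanB_char (d : List (String × Int)) (n low nm : List Char) (best : Nat)
    (bv : Int) (h1 : 1 ≤ best) (h3 : best ≤ 3) :
    scanB d n low nm best bv =
      match dget? d n with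
      | some v => v
      | none =>
        if best = 1 then bv
        else
          match dget? d low with
          | some v => v
          | none =>
            if best = 2 then bv
            else
              match firstBase d nm with
              | some v => v
              | none => bv := by
  induction d generalizing best bv with
  | nil =>
    simp only [scanB, dget?, firstBase]
    split_ifs <;> rfl
  | cons pv t ih =>
    obtain ⟨p, v⟩ := pv
    simp only [scanB, dget?, firstBase]
    by_cases hn : p.toList = n
    · simp [hn]
    · rw [if_neg hn, if_neg hn]
      by_cases hl : p.toList = low
      · rw [show (if p.toList = low then (1 : Nat)
                 else if nm ≠ [] ∧ bBase p.toList = nm then 2 else 3) = 1 from if_pos hl,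
            if_pos hl]
        interval_cases best
        · rw [if_neg (by omega), ih 1 bv le_rfl (by omega)]
          simp
        · rw [if_pos (by omega), ih 1 v le_rfl (by omega)]
          simp
        · rw [if_pos (by omega), ih 1 v le_rfl (by omega)]
          simp
      · rw [if_neg hl, if_neg hl]
        by_cases hb : nm ≠ [] ∧ bBase p.toList = nm
        · rw [show (if nm ≠ [] ∧ bBase p.toList = nm then (2 : Nat) else 3) = 2 from
              if_pos hb,
            if_pos hb]
          interval_cases best
          · rw [if_neg (by omega), ih 1 bv le_rfl (by omega)]
            cases dget? t n <;> simp
          · rw [if_neg (by omega), ih 2 bv (by omega) (by omega)]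
            cases dget? t n <;> [simp; (cases dget? t low <;> simp)]
          · rw [if_pos (by omega), ih 2 v (by omega) (by omega)]
            simp
        · rw [show (if nm ≠ [] ∧ bBase p.toList = nm then (2 : Nat) else 3) = 3 from
              if_neg hb,
            if_neg hb]
          rw [if_neg (by omega), ih best bv h1 h3]

theorem firstBase_nil_name (d : List (String × Int)) : firstBase d [] = none := by
  induction d with
  | nil => rfl
  | cons pv t ih => simp [firstBase, ih]

-- the basename stage: firstBase over the lowered name is A's fallback scan
theorem firstBase_eq_scanA (d : List (String × Int)) (fn : List Char) :
    (match firstBase d (PySem.Chars.lower fn) with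
     | some v => v
     | none => (0 : Int)) = if fn = [] then 0 else scanA d fn := by
  by_cases hfn : fn = []
  · subst hfn
    have hl0 : PySem.Chars.lower ([] : List Char) = [] := rfl
    rw [hl0, firstBase_nil_name]
    simp
  · rw [if_neg hfn]
    induction d with
    | nil => simp [firstBase, scanA]
    | cons pv t ih =>
      obtain ⟨p, v⟩ := pv
      simp only [firstBase, scanA]
      have hne : PySem.Chars.lower fn ≠ [] := by
        simp [lower_eq_nil_iff, hfn]
      by_cases hb : bBase p.toList = PySem.Chars.lower fn
      · rw [if_pos ⟨hne, hb⟩]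
        simp only [bBase] at hb
        rw [if_pos hb]
      · rw [if_neg (by simp [hb]), ih]
        simp only [bBase] at hb
        rw [if_neg hb]

-- ===== VERDICT (by name: the statement is the Claim_ definition above) =====
theorem find_duration_spec : Claim_equal_find_duration := by
  intro file_path durations _
  unfold Spec_find_duration
  simp only [find_duration, find_duration_alt, normalize_path]
  rw [scanB_char _ _ _ _ 3 0 (by omega) (by omega)]
  cases dget? durations
      (if PySem.Chars.startswith (PySem.Chars.replace file_path.toList ['\\'] ['/']) ['/']
       then PySem.Chars.replace file_path.toList ['\\'] ['/']
       else '/' :: PySem.Chars.replace file_path.toList ['\\'] ['/']) with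
  | some v => rfl
  | none =>
    cases dget? durations (PySem.Chars.lower
        (if PySem.Chars.startswith (PySem.Chars.replace file_path.toList ['\\'] ['/']) ['/']
         then PySem.Chars.replace file_path.toList ['\\'] ['/']
         else '/' :: PySem.Chars.replace file_path.toList ['\\'] ['/'])) with
    | some v => rfl
    | none =>
      exact (firstBase_eq_scanA durations _).symm
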